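-- pv_equiv track=rewrite | github.com/theredbluepill/arc-interactive | scripts/registry_ex_gp_lo_gif.py | _lo_toggle_effect
-- ===== SOURCE A (Python) =====
-- def _lo_toggle_effect(
--     lit: frozenset[tuple[int, int]],
--     gx: int,
--     gy: int,
--     walls: set[tuple[int, int]],
--     gw: int,
--     gh: int,
-- ) -> frozenset[tuple[int, int]]:
--     if (gx, gy) in walls:
--         return lit
--     s = set(lit)
--     for tx, ty in ((gx, gy), (gx - 1, gy), (gx + 1, gy), (gx, gy - 1), (gx, gy + 1)):
--         if not (0 <= tx < gw and 0 <= ty < gh):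
--             continue
--         if (tx, ty) in walls:
--             continue
--         p = (tx, ty)
--         if p in s:
--             s.remove(p)
--         else:
--             s.add(p)
--     return frozenset(s)
-- ===== SOURCE B (Python) =====
-- def _lo_toggle_effect(
--     lit: frozenset[tuple[int, int]],
--     gx: int,
--     gy: int,
--     walls: set[tuple[int, int]],
--     gw: int,
--     gh: int,
-- ) -> frozenset[tuple[int, int]]:
--     if (gx, gy) in walls:
--         return lit
--
--     def toggled(x, y):
--         # a cell flips iff it is within Manhattan distance 1 of the press,
--         # inside the grid, and not a wall
--         return (abs(x - gx) + abs(y - gy) <= 1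
--                 and 0 <= x < gw and 0 <= y < gh
--                 and (x, y) not in walls)
--
--     kept = [p for p in lit if not toggled(*p)]
--     added = [(tx, ty)
--              for tx, ty in ((gx, gy), (gx - 1, gy), (gx + 1, gy), (gx, gy - 1), (gx, gy + 1))
--              if toggled(tx, ty) and (tx, ty) not in lit]
--     return frozenset(kept + added)
-- ===== Notes on version B (the rewrite author's own statement) =====
-- stated objective: alternative
-- what changed: Replaces A's mutable-set toggle loop by a pointwise characterization: a cell flips iff it lies within Manhattan distance 1 of the press, in bounds and not a wall; B filters lit by that arithmetic predicate and appends the newly lit cells, never materializing or mutating a working set.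
import Mathlib
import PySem

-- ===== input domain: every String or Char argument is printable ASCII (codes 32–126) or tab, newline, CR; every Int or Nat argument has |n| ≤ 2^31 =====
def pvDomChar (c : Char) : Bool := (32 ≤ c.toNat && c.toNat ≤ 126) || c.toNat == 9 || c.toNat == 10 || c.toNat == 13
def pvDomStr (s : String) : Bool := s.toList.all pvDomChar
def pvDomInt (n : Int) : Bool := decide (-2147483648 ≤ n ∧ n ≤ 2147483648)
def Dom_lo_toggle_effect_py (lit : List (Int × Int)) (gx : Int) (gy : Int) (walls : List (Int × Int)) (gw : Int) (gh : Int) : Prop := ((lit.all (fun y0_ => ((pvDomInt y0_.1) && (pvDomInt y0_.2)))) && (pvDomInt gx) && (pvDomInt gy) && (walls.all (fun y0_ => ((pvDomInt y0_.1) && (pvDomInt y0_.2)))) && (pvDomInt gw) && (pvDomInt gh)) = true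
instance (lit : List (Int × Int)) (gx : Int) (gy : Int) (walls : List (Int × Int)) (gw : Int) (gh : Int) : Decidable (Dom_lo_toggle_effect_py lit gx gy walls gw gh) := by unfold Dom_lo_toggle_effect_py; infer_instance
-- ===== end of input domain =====

-- B replaces A's mutable-set toggle loop by a pointwise characterization (a cell flips iff it is
-- within Manhattan distance 1 of the press, in bounds and not a wall): filter lit by that
-- arithmetic predicate, then append the newly lit cells (alternative decomposition; equal cost).

-- ===== PORT A =====
-- Literal port of _lo_toggle_effect: wall guard, s = set(lit), then a loop over the five
-- plus-pattern cells with two 'continue' guards and an in/remove/add toggle, then frozenset(s).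
-- ('s.remove(p)' is only executed after 'p in s', so PySem.Set.discard is exact here.)
def lo_toggle_effect_py (lit : List (Int × Int)) (gx : Int) (gy : Int) (walls : List (Int × Int)) (gw : Int) (gh : Int) : List (Int × Int) :=
  if (gx, gy) ∈ walls then lit
  else
    let s0 : PySem.Set (Int × Int) := PySem.Set.ofList lit
    let s := [(gx, gy), (gx - 1, gy), (gx + 1, gy), (gx, gy - 1), (gx, gy + 1)].foldl
      (fun s p =>
        if ¬ (0 ≤ p.1 ∧ p.1 < gw ∧ 0 ≤ p.2 ∧ p.2 < gh) then s
        else if p ∈ walls then s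
        else if PySem.Set.contains s p then PySem.Set.discard s p else PySem.Set.add s p) s0
    PySem.Set.ofList s

-- ===== PORT B =====
-- Port of Source B: wall guard, the 'toggled' predicate (Manhattan distance ≤ 1, in bounds, not a
-- wall; abs → Int.natAbs), the 'kept' comprehension over lit, the 'added' comprehension over the
-- five plus cells, then frozenset(kept + added).
def lo_toggle_effect_py_alt (lit : List (Int × Int)) (gx : Int) (gy : Int) (walls : List (Int × Int)) (gw : Int) (gh : Int) : List (Int × Int) :=
  if (gx, gy) ∈ walls then lit
  else
    let toggled : Int → Int → Bool := fun x y =>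
      decide ((x - gx).natAbs + (y - gy).natAbs ≤ 1 ∧ 0 ≤ x ∧ x < gw ∧ 0 ≤ y ∧ y < gh ∧ (x, y) ∉ walls)
    let kept := lit.filter (fun p => !(toggled p.1 p.2))
    let added := [(gx, gy), (gx - 1, gy), (gx + 1, gy), (gx, gy - 1), (gx, gy + 1)].filter
      (fun p => toggled p.1 p.2 && decide (p ∉ lit))
    PySem.Set.ofList (kept ++ added)

-- ===== PRECONDITION & SPEC =====
def Spec_lo_toggle_effect_py (lit : List (Int × Int)) (gx : Int) (gy : Int) (walls : List (Int × Int)) (gw : Int) (gh : Int) (out : List (Int × Int)) : Prop := out = lo_toggle_effect_py_alt lit gx gy walls gw gh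
instance (lit : List (Int × Int)) (gx : Int) (gy : Int) (walls : List (Int × Int)) (gw : Int) (gh : Int) (out : List (Int × Int)) : Decidable (Spec_lo_toggle_effect_py lit gx gy walls gw gh out) := by unfold Spec_lo_toggle_effect_py; infer_instance

-- ===== CLAIM (what is proved, stated in full; the proofs are below) =====
def Claim_equal_lo_toggle_effect_py : Prop := ∀ (lit : List (Int × Int)) (gx : Int) (gy : Int) (walls : List (Int × Int)) (gw : Int) (gh : Int), Dom_lo_toggle_effect_py lit gx gy walls gw gh → Spec_lo_toggle_effect_py lit gx gy walls gw gh (lo_toggle_effect_py lit gx gy walls gw gh)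

-- ===== LEMMAS AND PROOFS =====

-- Toggling each element of a duplicate-free list ts in turn is the symmetric difference:
-- the survivors of s (in order) followed by the newly added elements of ts (in order).
theorem toggle_foldl (ts : List (Int × Int)) (s : List (Int × Int)) (hts : ts.Nodup) :
    ts.foldl (fun s p => if PySem.Set.contains s p then PySem.Set.discard s p else PySem.Set.add s p) s
      = s.filter (fun x => decide (x ∉ ts)) ++ ts.filter (fun x => decide (x ∉ s)) := by
  induction ts generalizing s with
  | nil => simp
  | cons p ts ih =>
    obtain ⟨hp, hts⟩ := List.nodup_cons.mp hts
    simp only [List.foldl_cons]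
    by_cases hmem : p ∈ s
    · rw [if_pos (by simpa [PySem.Set.contains_iff] using hmem), ih _ hts]
      have h1 : (PySem.Set.discard s p).filter (fun x => decide (x ∉ ts))
          = s.filter (fun x => decide (x ∉ p :: ts)) := by
        simp only [PySem.Set.discard, List.filter_filter]
        exact (List.filter_congr (fun x _ => by simp [beq_eq_decide, Bool.and_comm])).symm
      have h2 : ts.filter (fun x => decide (x ∉ PySem.Set.discard s p))
          = ts.filter (fun x => decide (x ∉ s)) := by
        refine List.filter_congr (fun x hx => ?_)
        have hxp : x ≠ p := fun h => hp (h ▸ hx)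
        simp [PySem.Set.discard, List.mem_filter, hxp]
      have h3 : (p :: ts).filter (fun x => decide (x ∉ s))
          = ts.filter (fun x => decide (x ∉ s)) := by
        simp [hmem]
      rw [h1, h2, h3]
    · rw [if_neg (by simpa [PySem.Set.contains_iff] using hmem),
        PySem.Set.add_of_not_mem hmem, ih _ hts]
      have h1 : (s ++ [p]).filter (fun x => decide (x ∉ ts))
          = s.filter (fun x => decide (x ∉ ts)) ++ [p] := by
        simp [List.filter_append, hp]
      have h2 : ts.filter (fun x => decide (x ∉ s ++ [p]))
          = ts.filter (fun x => decide (x ∉ s)) := by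
        refine List.filter_congr (fun x hx => ?_)
        have hxp : x ≠ p := fun h => hp (h ▸ hx)
        simp [hxp]
      have h3 : s.filter (fun x => decide (x ∉ p :: ts))
          = s.filter (fun x => decide (x ∉ ts)) := by
        refine List.filter_congr (fun x hx => ?_)
        have hxp : x ≠ p := fun h => hmem (h ▸ hx)
        simp [hxp]
      have h4 : (p :: ts).filter (fun x => decide (x ∉ s))
          = p :: ts.filter (fun x => decide (x ∉ s)) := by
        simp [hmem]
      rw [h1, h2, h3, h4, List.append_assoc]
      rfl

-- The five plus-pattern cells are pairwise distinct.
theorem cells_nodup (gx gy : Int) :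
    ([(gx, gy), (gx - 1, gy), (gx + 1, gy), (gx, gy - 1), (gx, gy + 1)] : List (Int × Int)).Nodup := by
  simp [List.nodup_cons, Prod.ext_iff]
  omega

-- Membership in the five plus-pattern cells is exactly Manhattan distance ≤ 1.
theorem mem_cells_iff (gx gy : Int) (p : Int × Int) :
    p ∈ ([(gx, gy), (gx - 1, gy), (gx + 1, gy), (gx, gy - 1), (gx, gy + 1)] : List (Int × Int))
      ↔ (p.1 - gx).natAbs + (p.2 - gy).natAbs ≤ 1 := by
  simp [Prod.ext_iff]
  omega

-- set() commutes with a comprehension filter: set(filter) = filter(set) (first occurrences).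
theorem ofList_filter {α : Type} [BEq α] [LawfulBEq α] (p : α → Bool) (l : List α) :
    PySem.Set.ofList (l.filter p) = (PySem.Set.ofList l).filter p := by
  induction l with
  | nil => simp
  | cons x xs ih =>
    by_cases hx : p x = true
    · rw [List.filter_cons_of_pos hx, PySem.Set.ofList_cons, PySem.Set.ofList_cons, ih,
        List.filter_cons_of_pos hx]
      simp only [PySem.Set.discard, List.filter_filter]
      congr 1
      exact List.filter_congr (fun y _ => by simp [Bool.and_comm])
    · rw [List.filter_cons_of_neg hx, PySem.Set.ofList_cons, ih,
        List.filter_cons_of_neg hx]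
      simp only [PySem.Set.discard, List.filter_filter]
      refine (List.filter_congr (fun y hy => ?_)).symm
      by_cases hyp : p y = true
      · have : y ≠ x := fun h => hx (h ▸ hyp)
        simp [hyp, this]
      · simp [Bool.eq_false_iff.mpr hyp]

-- ===== VERDICT (by name: the statement is the Claim_ definition above) =====
theorem lo_toggle_effect_py_spec : Claim_equal_lo_toggle_effect_py := by
  intro lit gx gy walls gw gh _
  unfold Spec_lo_toggle_effect_py lo_toggle_effect_py lo_toggle_effect_py_alt
  by_cases hw : (gx, gy) ∈ walls
  · simp [hw]
  · simp only [if_neg hw]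
    set cells : List (Int × Int) := [(gx, gy), (gx - 1, gy), (gx + 1, gy), (gx, gy - 1), (gx, gy + 1)] with hcells
    -- unify A's guarded fold with a fold over the filtered cell list
    have hbody : ∀ (s : PySem.Set (Int × Int)),
        cells.foldl (fun s p =>
            if ¬ (0 ≤ p.1 ∧ p.1 < gw ∧ 0 ≤ p.2 ∧ p.2 < gh) then s
            else if p ∈ walls then s
            else if PySem.Set.contains s p then PySem.Set.discard s p else PySem.Set.add s p) s
          = (cells.filter (fun p => decide (0 ≤ p.1 ∧ p.1 < gw ∧ 0 ≤ p.2 ∧ p.2 < gh ∧ p ∉ walls))).foldl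
              (fun s p => if PySem.Set.contains s p then PySem.Set.discard s p else PySem.Set.add s p) s := by
      intro s
      rw [← PySem.List.foldl_ite_eq_foldl_filter
        (p := fun p : Int × Int => 0 ≤ p.1 ∧ p.1 < gw ∧ 0 ≤ p.2 ∧ p.2 < gh ∧ p ∉ walls)]
      refine PySem.List.foldl_congr_mem _ _ _ _ (fun s p hp => ?_)
      by_cases h1 : 0 ≤ p.1 ∧ p.1 < gw ∧ 0 ≤ p.2 ∧ p.2 < gh
      · by_cases h2 : p ∈ walls <;> simp [h1, h2]
      · have h3 : ¬ (0 ≤ p.1 ∧ p.1 < gw ∧ 0 ≤ p.2 ∧ p.2 < gh ∧ p ∉ walls) :=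
          fun h => h1 ⟨h.1, h.2.1, h.2.2.1, h.2.2.2.1⟩
        simp [h1, h3]
    set ts : List (Int × Int) :=
      cells.filter (fun p => decide (0 ≤ p.1 ∧ p.1 < gw ∧ 0 ≤ p.2 ∧ p.2 < gh ∧ p ∉ walls)) with hts
    have htsnd : ts.Nodup := (cells_nodup gx gy).filter _
    have hs0 : (PySem.Set.ofList lit : List (Int × Int)).Nodup := PySem.Set.nodup_ofList lit
    -- membership in ts is exactly the 'toggled' predicate of B
    have hmem_ts : ∀ x : Int × Int, x ∈ ts ↔
        ((x.1 - gx).natAbs + (x.2 - gy).natAbs ≤ 1 ∧ 0 ≤ x.1 ∧ x.1 < gw ∧ 0 ≤ x.2 ∧ x.2 < gh ∧ x ∉ walls) := by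
      intro x
      rw [hts, List.mem_filter, mem_cells_iff]
      simp only [decide_eq_true_eq]
    rw [hbody, toggle_foldl ts _ htsnd]
    have hnd : ((PySem.Set.ofList lit).filter (fun x => decide (x ∉ ts))
        ++ ts.filter (fun x => decide (x ∉ PySem.Set.ofList lit))).Nodup := by
      refine List.Nodup.append (hs0.filter _) (htsnd.filter _) ?_
      intro x hx1 hx2
      have h1 := (List.mem_filter.mp hx1).2
      have h2 := (List.mem_filter.mp hx2).1
      exact absurd h2 (by simpa using h1)
    rw [PySem.Set.ofList_eq_self_of_nodup _ hnd]
    simp only [Prod.mk.eta]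
    -- name B's two comprehension predicates
    set q : (Int × Int) → Bool := fun p =>
      !decide ((p.1 - gx).natAbs + (p.2 - gy).natAbs ≤ 1 ∧ 0 ≤ p.1 ∧ p.1 < gw ∧ 0 ≤ p.2 ∧ p.2 < gh ∧ p ∉ walls) with hq
    set r : (Int × Int) → Bool := fun p =>
      decide ((p.1 - gx).natAbs + (p.2 - gy).natAbs ≤ 1 ∧ 0 ≤ p.1 ∧ p.1 < gw ∧ 0 ≤ p.2 ∧ p.2 < gh ∧ p ∉ walls)
        && decide (p ∉ lit) with hr
    have haddednd : (cells.filter r).Nodup := (cells_nodup gx gy).filter _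
    -- frozenset(kept + added) = set(kept) followed by added (added is fresh w.r.t. kept)
    have hB : PySem.Set.ofList (lit.filter q ++ cells.filter r)
        = PySem.Set.ofList (lit.filter q) ++ cells.filter r := by
      rw [PySem.Set.ofList_append, PySem.Set.update_eq_append_filter,
        PySem.Set.ofList_eq_self_of_nodup _ haddednd]
      congr 1
      rw [List.filter_eq_self]
      intro x hx
      have hxl : x ∉ lit := by
        have := (List.mem_filter.mp hx).2
        rw [hr] at this
        simp only [Bool.and_eq_true, decide_eq_true_eq] at this
        exact this.2
      have hxk : x ∉ PySem.Set.ofList (lit.filter q) := by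
        intro hmem
        exact hxl (List.mem_filter.mp ((PySem.Set.mem_ofList _ _).mp hmem)).1
      simp [hxk]
    rw [hB, ofList_filter q lit]
    congr 1
    · -- survivors block: x ∉ ts ↔ q x
      refine (List.filter_congr (fun x _ => ?_)).symm
      by_cases h : x ∈ ts
      · have := (hmem_ts x).mp h
        simp [h, hq, this]
      · have hng := fun hc => h ((hmem_ts x).mpr hc)
        simp [h, hq]
        by_contra hcon
        push Not at hcon
        obtain ⟨h1, h2, h3, h4, h5, h6⟩ := hcon
        exact hng ⟨by omega, by omega, by omega, by omega, by omega, h6⟩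
    · -- additions block: ts.filter (∉ set(lit)) = cells.filter r
      rw [hts, List.filter_filter]
      refine List.filter_congr (fun x hx => ?_)
      have hd : (x.1 - gx).natAbs + (x.2 - gy).natAbs ≤ 1 := (mem_cells_iff gx gy x).mp hx
      rw [hr]
      simp only [PySem.Set.mem_ofList]
      by_cases hv : 0 ≤ x.1 ∧ x.1 < gw ∧ 0 ≤ x.2 ∧ x.2 < gh ∧ x ∉ walls
      · by_cases hl : x ∈ lit <;> simp [hv, hd, hl]
      · have hv2 : ¬ ((x.1 - gx).natAbs + (x.2 - gy).natAbs ≤ 1 ∧ 0 ≤ x.1 ∧ x.1 < gw ∧ 0 ≤ x.2 ∧ x.2 < gh ∧ x ∉ walls) :=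
          fun h => hv h.2
        simp [hv]
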